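-- pv_equiv track=rewrite | github.com/aduriseti/nemotron | reasoners/cryptarithm_solver/python_solver.py | _derive_output
-- ===== SOURCE A (Python) =====
-- MATH_OPS = {
--     'add':         {'fn': lambda L, R, d1, d2, d3, d4: L + R,                                                   'sym': '+'},
--     'sub':         {'fn': lambda L, R, d1, d2, d3, d4: L - R,                                                   'sym': '-'},
--     'mul':         {'fn': lambda L, R, d1, d2, d3, d4: L * R,                                                   'sym': '*'},
--     'cat':         {'fn': lambda L, R, d1, d2, d3, d4: int(str(L) + str(R)),                                    'sym': '||'},
--     'max_mod_min': {'fn': lambda L, R, d1, d2, d3, d4: max(L, R) % min(L, R) if min(L, R) != 0 else max(L, R), 'sym': ''},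
--     'add1':        {'fn': lambda L, R, d1, d2, d3, d4: L + R + 1,                                               'sym': ''},
--     'addm1':       {'fn': lambda L, R, d1, d2, d3, d4: L + R - 1,                                               'sym': '-'},
--     'mul1':        {'fn': lambda L, R, d1, d2, d3, d4: L * R + 1,                                               'sym': ''},
--     'mulm1':       {'fn': lambda L, R, d1, d2, d3, d4: L * R - 1,                                               'sym': '-'},
--     'sub_abs':     {'fn': lambda L, R, d1, d2, d3, d4: abs(L - R),                                              'sym': ''},
--     'sub_neg_abs': {'fn': lambda L, R, d1, d2, d3, d4: -abs(L - R),                                             'sym': '-'},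
-- }
--
-- FORMATTERS = {
--     'raw': {
--         'pre':  lambda A, B: (make_num(A), make_num(B), A[0], A[1], B[0], B[1]),
--         'post': lambda val: str(val),
--     },
--     'swap': {
--         'pre':  lambda A, B: (make_num(A[::-1]), make_num(B[::-1]), A[1], A[0], B[1], B[0]),
--         'post': lambda val: ('-' + str(val)[1:][::-1] if str(val).startswith('-') else str(val)[::-1]),
--     },
--     'rev': {
--         'pre':  lambda A, B: (make_num(B[::-1]), make_num(A[::-1]), B[1], B[0], A[1], A[0]),
--         'post': lambda val: str(val)[::-1],
--     },
-- }
--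
-- def _derive_output(
--     result_val,
--     out_syms: list[str],
--     f_type: str,
--     op_name: str,
--     op_sym: str,
--     digit_map: dict[str, int],
--     used: set[int],
-- ) -> tuple[dict[str, int], bool]:
--     try:
--         fmt_str = FORMATTERS[f_type]['post'](result_val)
--     except Exception:
--         return {}, False
--     m_sym = MATH_OPS[op_name]['sym']
--     if m_sym == '-':
--         fmt_str = fmt_str.replace('-', op_sym)
--     elif m_sym != '':
--         fmt_str = fmt_str.replace(m_sym, op_sym)
--
--     if len(fmt_str) != len(out_syms):
--         return {}, False
--
--     new_assign: dict[str, int] = {}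
--     new_used: set[int] = set()
--
--     for ch, sym in zip(fmt_str, out_syms):
--         if ch.isdigit():
--             required = int(ch)
--             if sym in digit_map:
--                 if digit_map[sym] != required:
--                     return {}, False
--             elif sym in new_assign:
--                 if new_assign[sym] != required:
--                     return {}, False
--             else:
--                 if required in used or required in new_used:
--                     return {}, False
--                 new_assign[sym] = required
--                 new_used.add(required)
--         else:
--             if ch != sym:
--                 return {}, False
--
--     return new_assign, True
-- ===== SOURCE B (Python) =====
-- # Same pre-formatting/replace/length guard as the original, but the fused
-- # validation loop is replaced by separate passes: literal check, digit_map
-- # check, candidate collection, then a freshness/distinctness check.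
--
-- _POST = {
--     'raw':  lambda v: str(v),
--     'swap': lambda v: '-' + str(v)[1:][::-1] if str(v).startswith('-') else str(v)[::-1],
--     'rev':  lambda v: str(v)[::-1],
-- }
--
-- _SYM = {'add': '+', 'sub': '-', 'mul': '*', 'cat': '||', 'max_mod_min': '',
--         'add1': '', 'addm1': '-', 'mul1': '', 'mulm1': '-',
--         'sub_abs': '', 'sub_neg_abs': '-'}
--
-- def _derive_output(result_val, out_syms, f_type, op_name, op_sym, digit_map, used):
--     if f_type not in _POST:
--         return {}, False
--     fmt_str = _POST[f_type](result_val)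
--     m_sym = _SYM[op_name]
--     if m_sym == '-':
--         fmt_str = fmt_str.replace('-', op_sym)
--     elif m_sym != '':
--         fmt_str = fmt_str.replace(m_sym, op_sym)
--     if len(fmt_str) != len(out_syms):
--         return {}, False
--
--     pairs = list(zip(fmt_str, out_syms))
--     # pass 1: non-digit positions must carry exactly their symbol
--     if any(ch != sym for ch, sym in pairs if not ch.isdigit()):
--         return {}, False
--     # pass 2: digit positions whose symbol is pre-assigned must agree with digit_map
--     if any(digit_map[sym] != int(ch) for ch, sym in pairs if ch.isdigit() and sym in digit_map):
--         return {}, False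
--     # pass 3: collect new assignments (first occurrence wins), reject inconsistency
--     new_assign = {}
--     for ch, sym in pairs:
--         if ch.isdigit() and sym not in digit_map:
--             d = int(ch)
--             if new_assign.setdefault(sym, d) != d:
--                 return {}, False
--     # pass 4: every newly assigned digit must be unused and mutually distinct
--     vals = list(new_assign.values())
--     if any(v in used for v in vals) or len(set(vals)) != len(vals):
--         return {}, False
--     return new_assign, True
-- ===== Notes on version B (the rewrite author's own statement) =====
-- stated objective: alternative
-- what changed: The fused single validation loop carrying new_assign and new_used with interleaved early returns is split into separate passes: a literal-position check, a digit_map consistency check, a candidate-assignment collection pass, and a final freshness/distinctness check on the collected values.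
import Mathlib
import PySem

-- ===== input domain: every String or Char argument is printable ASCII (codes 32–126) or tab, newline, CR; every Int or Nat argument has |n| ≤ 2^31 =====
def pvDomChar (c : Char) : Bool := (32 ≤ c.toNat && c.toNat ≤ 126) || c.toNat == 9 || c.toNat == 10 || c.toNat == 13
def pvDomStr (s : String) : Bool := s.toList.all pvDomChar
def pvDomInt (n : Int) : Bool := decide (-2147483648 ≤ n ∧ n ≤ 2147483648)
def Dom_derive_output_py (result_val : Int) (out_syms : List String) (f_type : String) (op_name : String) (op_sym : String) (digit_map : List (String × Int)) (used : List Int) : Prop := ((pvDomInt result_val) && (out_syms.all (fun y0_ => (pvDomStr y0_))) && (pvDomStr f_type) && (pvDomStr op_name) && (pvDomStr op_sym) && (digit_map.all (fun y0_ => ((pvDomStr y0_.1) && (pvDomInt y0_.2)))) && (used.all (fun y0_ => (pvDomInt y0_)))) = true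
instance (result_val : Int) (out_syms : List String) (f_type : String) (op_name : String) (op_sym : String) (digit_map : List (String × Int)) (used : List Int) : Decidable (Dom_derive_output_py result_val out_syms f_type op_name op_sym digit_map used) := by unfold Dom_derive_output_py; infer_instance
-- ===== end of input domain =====

-- B replaces A's fused validation loop (new_assign/new_used built and checked in one pass
-- with interleaved early returns) by separate passes: literal check, digit_map check,
-- candidate collection, then a freshness/distinctness check (objective: alternative).

-- ===== shared module context (MATH_OPS 'sym' table and FORMATTERS 'post' lambdas, used verbatim by both Pythons) =====

-- MATH_OPS[op_name]['sym']; none = op_name not a key (Python KeyError, excluded by Pre_)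
def pvMathSym (op_name : String) : Option String :=
  if op_name = "add" then some "+"
  else if op_name = "sub" then some "-"
  else if op_name = "mul" then some "*"
  else if op_name = "cat" then some "||"
  else if op_name = "max_mod_min" then some ""
  else if op_name = "add1" then some ""
  else if op_name = "addm1" then some "-"
  else if op_name = "mul1" then some ""
  else if op_name = "mulm1" then some "-"
  else if op_name = "sub_abs" then some ""
  else if op_name = "sub_neg_abs" then some "-"
  else none

-- FORMATTERS[f_type]['post'](result_val) as a list of chars; none = f_type not a key (caught: return {}, False)
def pvPost (f_type : String) (v : Int) : Option (List Char) :=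
  let s := PySem.Int.toChars v
  if f_type = "raw" then some s
  else if f_type = "swap" then
    -- '-' + str(v)[1:][::-1] if str(v).startswith('-') else str(v)[::-1]
    some (match s with
          | '-' :: rest => '-' :: rest.reverse
          | _ => s.reverse)
  else if f_type = "rev" then some s.reverse
  else none

-- the replace step both Pythons apply to fmt_str
def pvApplySym (fs : List Char) (m_sym op_sym : String) : List Char :=
  if m_sym = "-" then PySem.Chars.replace fs ['-'] op_sym.toList
  else if m_sym ≠ "" then PySem.Chars.replace fs m_sym.toList op_sym.toList
  else fs

-- int(ch) for a char satisfying isdigit (ASCII under Dom): exact digit value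
def pvDigitVal (c : Char) : Int := (c.toNat : Int) - 48

-- ===== PORT A =====
-- the single fused loop over zip(fmt_str, out_syms), carrying new_assign and new_used
def pvALoop (digit_map : List (String × Int)) (used : List Int) :
    List (Char × String) → PySem.Dict String Int → PySem.Set Int → (List (String × Int)) × Bool
  | [], new_assign, _ => (new_assign.items, true)
  | (ch, sym) :: rest, new_assign, new_used =>
    if PySem.Chars.isdigit ch then
      let required := pvDigitVal ch
      match (PySem.Dict.mk digit_map).get? sym with
      | some v => if v ≠ required then ([], false) else pvALoop digit_map used rest new_assign new_used
      | none =>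
        match new_assign.get? sym with
        | some v => if v ≠ required then ([], false) else pvALoop digit_map used rest new_assign new_used
        | none =>
          if used.contains required || PySem.Set.contains new_used required then ([], false)
          else pvALoop digit_map used rest (new_assign.insert sym required) (PySem.Set.add new_used required)
    else
      if sym ≠ String.mk [ch] then ([], false)
      else pvALoop digit_map used rest new_assign new_used

def derive_output_py (result_val : Int) (out_syms : List String) (f_type : String) (op_name : String) (op_sym : String) (digit_map : List (String × Int)) (used : List Int) : (List (String × Int)) × Bool :=
  match pvPost f_type result_val with
  | none => ([], false)
  | some fmt0 =>
    match pvMathSym op_name with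
    | none => ([], false)   -- Python raises KeyError here; excluded by Pre_
    | some m_sym =>
      let fmt_str := pvApplySym fmt0 m_sym op_sym
      if fmt_str.length ≠ out_syms.length then ([], false)
      else pvALoop digit_map used (fmt_str.zip out_syms) PySem.Dict.empty PySem.Set.empty

-- ===== PORT B =====
-- pass 1 predicate: a non-digit position whose char differs from its symbol
def pvBBad1 (p : Char × String) : Bool := !PySem.Chars.isdigit p.1 && decide (p.2 ≠ String.mk [p.1])

-- pass 2 predicate: a digit position whose pre-assigned symbol disagrees with digit_map
def pvBBad2 (digit_map : List (String × Int)) (p : Char × String) : Bool :=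
  PySem.Chars.isdigit p.1 &&
    (match (PySem.Dict.mk digit_map).get? p.2 with
     | some v => decide (v ≠ pvDigitVal p.1)
     | none => false)

-- pass 3: collect candidate assignments, first occurrence wins; none = inconsistency
def pvBCollect (digit_map : List (String × Int)) :
    List (Char × String) → PySem.Dict String Int → Option (PySem.Dict String Int)
  | [], acc => some acc
  | (ch, sym) :: rest, acc =>
    if PySem.Chars.isdigit ch && ((PySem.Dict.mk digit_map).get? sym).isNone then
      match acc.get? sym with
      | some v => if v ≠ pvDigitVal ch then none else pvBCollect digit_map rest acc
      | none => pvBCollect digit_map rest (acc.insert sym (pvDigitVal ch))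
    else pvBCollect digit_map rest acc

def derive_output_py_alt (result_val : Int) (out_syms : List String) (f_type : String) (op_name : String) (op_sym : String) (digit_map : List (String × Int)) (used : List Int) : (List (String × Int)) × Bool :=
  match pvPost f_type result_val with
  | none => ([], false)
  | some fmt0 =>
    match pvMathSym op_name with
    | none => ([], false)   -- Python raises KeyError here; excluded by Pre_
    | some m_sym =>
      let fmt_str := pvApplySym fmt0 m_sym op_sym
      if fmt_str.length ≠ out_syms.length then ([], false)
      else
        let pairs := fmt_str.zip out_syms
        if pairs.any pvBBad1 then ([], false)
        else if pairs.any (pvBBad2 digit_map) then ([], false)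
        else
          match pvBCollect digit_map pairs PySem.Dict.empty with
          | none => ([], false)
          | some na =>
            -- pass 4: vals fresh w.r.t. used and mutually distinct (len(set(vals)) == len(vals))
            if na.values.any (fun v => used.contains v)
                || decide ((PySem.Set.ofList na.values).length ≠ na.values.length)
            then ([], false)
            else (na.items, true)

-- ===== PRECONDITION & SPEC =====
-- Pre_ excludes exactly the inputs where A raises KeyError: a valid f_type together with
-- an op_name that is not a MATH_OPS key (the MATH_OPS lookup is outside the try block).
def Pre_derive_output_py (result_val : Int) (out_syms : List String) (f_type : String) (op_name : String) (op_sym : String) (digit_map : List (String × Int)) (used : List Int) : Prop :=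
  f_type ∈ ["raw", "swap", "rev"] →
    op_name ∈ ["add", "sub", "mul", "cat", "max_mod_min", "add1", "addm1", "mul1", "mulm1", "sub_abs", "sub_neg_abs"]
instance (result_val : Int) (out_syms : List String) (f_type : String) (op_name : String) (op_sym : String) (digit_map : List (String × Int)) (used : List Int) : Decidable (Pre_derive_output_py result_val out_syms f_type op_name op_sym digit_map used) := by unfold Pre_derive_output_py; infer_instance

def pvWitness_derive_output_py : Int × List String × String × String × String × (List (String × Int)) × List Int :=
  (12, ["A", "B"], "raw", "add", "+", [("A", 1)], [3])

def Spec_derive_output_py (result_val : Int) (out_syms : List String) (f_type : String) (op_name : String) (op_sym : String) (digit_map : List (String × Int)) (used : List Int) (out : (List (String × Int)) × Bool) : Prop := out = derive_output_py_alt result_val out_syms f_type op_name op_sym digit_map used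
instance (result_val : Int) (out_syms : List String) (f_type : String) (op_name : String) (op_sym : String) (digit_map : List (String × Int)) (used : List Int) (out : (List (String × Int)) × Bool) : Decidable (Spec_derive_output_py result_val out_syms f_type op_name op_sym digit_map used out) := by unfold Spec_derive_output_py; infer_instance

-- ===== CLAIM (what is proved, stated in full; the proofs are below) =====
def Claim_equal_derive_output_py : Prop := ∀ (result_val : Int) (out_syms : List String) (f_type : String) (op_name : String) (op_sym : String) (digit_map : List (String × Int)) (used : List Int), Dom_derive_output_py result_val out_syms f_type op_name op_sym digit_map used → Pre_derive_output_py result_val out_syms f_type op_name op_sym digit_map used → Spec_derive_output_py result_val out_syms f_type op_name op_sym digit_map used (derive_output_py result_val out_syms f_type op_name op_sym digit_map used)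

-- ===== LEMMAS AND PROOFS =====

-- B's tail (passes 1-4) as a function of the remaining pairs and collected state
def pvRHS (digit_map : List (String × Int)) (used : List Int) (pairs : List (Char × String)) (na : PySem.Dict String Int) : (List (String × Int)) × Bool :=
  if pairs.any pvBBad1 then ([], false)
  else if pairs.any (pvBBad2 digit_map) then ([], false)
  else
    match pvBCollect digit_map pairs na with
    | none => ([], false)
    | some na' =>
      if na'.values.any (fun v => used.contains v)
          || decide ((PySem.Set.ofList na'.values).length ≠ na'.values.length)
      then ([], false)
      else (na'.items, true)

-- inserting an absent key appends the pair
theorem pvInsertItems (acc : PySem.Dict String Int) (k : String) (v : Int)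
    (h : acc.get? k = none) : (acc.insert k v).items = acc.items ++ [(k, v)] := by
  have hc : acc.contains k = false := by
    rw [PySem.Dict.contains_eq_isSome_get?, h]; rfl
  unfold PySem.Dict.insert
  rw [hc]
  simp

theorem pvInsertValues (acc : PySem.Dict String Int) (k : String) (v : Int)
    (h : acc.get? k = none) : (acc.insert k v).values = acc.values ++ [v] := by
  unfold PySem.Dict.values
  rw [pvInsertItems acc k v h]
  simp

-- length of a Set-add fold is bounded by start + number of elements added
theorem pvFoldlAddLen {α : Type} [BEq α] : ∀ (l : List α) (s : PySem.Set α),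
    (l.foldl PySem.Set.add s).length ≤ s.length + l.length := by
  intro l
  induction l with
  | nil => intro s; simp
  | cons x xs ih =>
    intro s
    simp only [List.foldl_cons]
    have h1 : (PySem.Set.add s x).length ≤ s.length + 1 := by
      unfold PySem.Set.add; split <;> simp
    have := ih (PySem.Set.add s x)
    simp only [List.length_cons]
    omega

theorem pvFoldlAddNodup {α : Type} [BEq α] [LawfulBEq α] : ∀ (l : List α) (s : PySem.Set α), s.Nodup →
    (l.foldl PySem.Set.add s).length = s.length + l.length → (s ++ l).Nodup := by
  intro l
  induction l with
  | nil => intro s hs _; simpa using hs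
  | cons x xs ih =>
    intro s hs hlen
    simp only [List.foldl_cons] at hlen
    by_cases hc : x ∈ s
    · exfalso
      have hadd : PySem.Set.add s x = s := by unfold PySem.Set.add; simp [hc]
      have := pvFoldlAddLen xs s
      rw [hadd] at hlen
      simp only [List.length_cons] at hlen
      omega
    · have hadd : PySem.Set.add s x = s ++ [x] := by unfold PySem.Set.add; simp [hc]
      rw [hadd] at hlen
      have hnd : (s ++ [x]).Nodup := by
        rw [List.nodup_append]
        refine ⟨hs, List.nodup_singleton x, ?_⟩
        intro a ha b hb
        rw [List.mem_singleton] at hb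
        subst hb
        exact fun h => hc (h ▸ ha)
      have := ih (s ++ [x]) hnd (by simp at hlen ⊢; omega)
      simpa [List.append_assoc] using this

-- if set(vals) has as many elements as vals, vals had no duplicates
theorem pvOfListNodup_of_len {α : Type} [BEq α] [LawfulBEq α] (l : List α)
    (h : (PySem.Set.ofList l).length = l.length) : l.Nodup := by
  have := pvFoldlAddNodup l [] (by simp) (by simpa [PySem.Set.ofList, PySem.Set.empty] using h)
  simpa using this

-- pvBCollect only appends to its accumulator
theorem pvBCollect_mono (digit_map : List (String × Int)) :
    ∀ (pairs : List (Char × String)) (acc acc' : PySem.Dict String Int),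
      pvBCollect digit_map pairs acc = some acc' →
      ∃ ext, acc'.items = acc.items ++ ext := by
  intro pairs
  induction pairs with
  | nil =>
    intro acc acc' h
    simp only [pvBCollect, Option.some.injEq] at h
    exact ⟨[], by simp [h]⟩
  | cons p rest ih =>
    obtain ⟨ch, sym⟩ := p
    intro acc acc' h
    simp only [pvBCollect] at h
    split at h
    · cases hget : acc.get? sym with
      | some v =>
        rw [hget] at h
        dsimp only at h
        by_cases hvd : v = pvDigitVal ch
        · rw [if_neg (by simp [hvd])] at h
          exact ih acc acc' h
        · rw [if_pos hvd] at h
          cases h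
      | none =>
        rw [hget] at h
        dsimp only at h
        obtain ⟨ext, hext⟩ := ih _ _ h
        exact ⟨(sym, pvDigitVal ch) :: ext, by rw [hext, pvInsertItems acc sym _ hget]; simp⟩
    · exact ih acc acc' h

-- pvRHS step lemmas --------------------------------------------------------

theorem pvRHS_skip (digit_map : List (String × Int)) (used : List Int)
    (p : Char × String) (rest : List (Char × String)) (na na2 : PySem.Dict String Int)
    (h1 : pvBBad1 p = false) (h2 : pvBBad2 digit_map p = false)
    (hc : pvBCollect digit_map (p :: rest) na = pvBCollect digit_map rest na2) :
    pvRHS digit_map used (p :: rest) na = pvRHS digit_map used rest na2 := by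
  unfold pvRHS
  rw [hc, List.any_cons, List.any_cons, h1, h2]
  simp only [Bool.false_or]

theorem pvRHS_none (digit_map : List (String × Int)) (used : List Int)
    (pairs : List (Char × String)) (na : PySem.Dict String Int)
    (h : pvBCollect digit_map pairs na = none) :
    pvRHS digit_map used pairs na = ([], false) := by
  unfold pvRHS
  rw [h]
  split
  · rfl
  · split <;> rfl

theorem pvRHS_bad1 (digit_map : List (String × Int)) (used : List Int)
    (p : Char × String) (rest : List (Char × String)) (na : PySem.Dict String Int)
    (h : pvBBad1 p = true) :
    pvRHS digit_map used (p :: rest) na = ([], false) := by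
  unfold pvRHS
  rw [List.any_cons, h]
  simp

theorem pvRHS_bad2 (digit_map : List (String × Int)) (used : List Int)
    (p : Char × String) (rest : List (Char × String)) (na : PySem.Dict String Int)
    (h : pvBBad2 digit_map p = true) :
    pvRHS digit_map used (p :: rest) na = ([], false) := by
  unfold pvRHS
  rw [List.any_cons, List.any_cons, h]
  split
  · rfl
  · simp

theorem pvRHS_poisoned (digit_map : List (String × Int)) (used : List Int)
    (pairs : List (Char × String)) (na : PySem.Dict String Int)
    (h : ∀ na', pvBCollect digit_map pairs na = some na' →
      (na'.values.any (fun v => used.contains v)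
        || decide ((PySem.Set.ofList na'.values).length ≠ na'.values.length)) = true) :
    pvRHS digit_map used pairs na = ([], false) := by
  unfold pvRHS
  split
  · rfl
  · split
    · rfl
    · cases hcol : pvBCollect digit_map pairs na with
      | none => rfl
      | some na' =>
        dsimp only
        rw [if_pos (h na' hcol)]

-- main loop equivalence, generalized over the accumulator state
theorem pvMain (digit_map : List (String × Int)) (used : List Int) :
    ∀ (pairs : List (Char × String)) (na : PySem.Dict String Int),
      na.values.Nodup → (∀ v ∈ na.values, used.contains v = false) →
      pvALoop digit_map used pairs na na.values = pvRHS digit_map used pairs na := by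
  intro pairs
  induction pairs with
  | nil =>
    intro na hnd hu
    have h1 : na.values.any (fun v => used.contains v) = false := by
      rw [List.any_eq_false]
      intro v hv
      rw [hu v hv]
      simp
    have h2 : (PySem.Set.ofList na.values).length = na.values.length := by
      rw [PySem.Set.ofList_eq_self_of_nodup _ hnd]
    unfold pvRHS
    simp only [pvALoop, pvBCollect, List.any_nil, h1, h2]
    simp
  | cons p rest ih =>
    obtain ⟨ch, sym⟩ := p
    intro na hnd hu
    by_cases hd : PySem.Chars.isdigit ch = true
    · have hb1 : pvBBad1 (ch, sym) = false := by simp [pvBBad1, hd]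
      cases hdm : (PySem.Dict.mk digit_map).get? sym with
      | some v =>
        by_cases hv : v = pvDigitVal ch
        · -- pre-assigned and consistent: both sides skip the position
          have hL : pvALoop digit_map used ((ch, sym) :: rest) na na.values
              = pvALoop digit_map used rest na na.values := by
            simp only [pvALoop, hd, hdm, hv]
            simp
          rw [hL, ih na hnd hu]
          exact (pvRHS_skip digit_map used (ch, sym) rest na na hb1
            (by simp [pvBBad2, hdm, hv]) (by simp [pvBCollect, hdm])).symm
        · -- pre-assigned and inconsistent: both fail
          have hL : pvALoop digit_map used ((ch, sym) :: rest) na na.values = ([], false) := by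
            simp only [pvALoop, hd, hdm]
            simp [hv]
          rw [hL, pvRHS_bad2 digit_map used (ch, sym) rest na (by simp [pvBBad2, hd, hdm, hv])]
      | none =>
        have hb2 : pvBBad2 digit_map (ch, sym) = false := by simp [pvBBad2, hdm]
        cases hna : na.get? sym with
        | some v =>
          by_cases hv : v = pvDigitVal ch
          · -- already newly assigned, consistent: both skip
            have hL : pvALoop digit_map used ((ch, sym) :: rest) na na.values
                = pvALoop digit_map used rest na na.values := by
              simp only [pvALoop, hd, hdm, hna, hv]
              simp
            rw [hL, ih na hnd hu]
            exact (pvRHS_skip digit_map used (ch, sym) rest na na hb1 hb2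
              (by simp [pvBCollect, hdm, hna, hv])).symm
          · -- already newly assigned, inconsistent: both fail
            have hL : pvALoop digit_map used ((ch, sym) :: rest) na na.values = ([], false) := by
              simp only [pvALoop, hd, hdm, hna]
              simp [hv]
            rw [hL, pvRHS_none digit_map used _ na (by simp [pvBCollect, hd, hdm, hna, hv])]
        | none =>
          have hstep : pvBCollect digit_map ((ch, sym) :: rest) na
              = pvBCollect digit_map rest (na.insert sym (pvDigitVal ch)) := by
            simp [pvBCollect, hd, hdm, hna]
          by_cases huse : used.contains (pvDigitVal ch) = true
          · -- digit already used globally: A fails; B's pass 4 rejects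
            have hL : pvALoop digit_map used ((ch, sym) :: rest) na na.values = ([], false) := by
              simp only [pvALoop, hd, hdm, hna]
              have hcond : (used.contains (pvDigitVal ch) || PySem.Set.contains na.values (pvDigitVal ch)) = true := by
                rw [Bool.or_eq_true]; exact Or.inl huse
              rw [if_pos hcond]
              simp
            rw [hL]
            refine (pvRHS_poisoned digit_map used _ na ?_).symm
            intro na' hcol
            rw [hstep] at hcol
            obtain ⟨ext, hext⟩ := pvBCollect_mono digit_map rest _ na' hcol
            rw [pvInsertItems na sym _ hna] at hext
            have hmem : pvDigitVal ch ∈ na'.values := by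
              unfold PySem.Dict.values
              rw [hext]
              simp
            rw [Bool.or_eq_true, List.any_eq_true]
            exact Or.inl ⟨pvDigitVal ch, hmem, huse⟩
          · by_cases hnu : pvDigitVal ch ∈ na.values
            · -- digit duplicated among the new assignments: A fails; B's pass 4 rejects
              have hnuc : PySem.Set.contains na.values (pvDigitVal ch) = true := by
                rw [PySem.Set.contains_iff]
                exact hnu
              have hL : pvALoop digit_map used ((ch, sym) :: rest) na na.values = ([], false) := by
                simp only [pvALoop, hd, hdm, hna]
                have hcond : (used.contains (pvDigitVal ch) || PySem.Set.contains na.values (pvDigitVal ch)) = true := by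
                  rw [Bool.or_eq_true]; exact Or.inr hnuc
                rw [if_pos hcond]
                simp
              rw [hL]
              refine (pvRHS_poisoned digit_map used _ na ?_).symm
              intro na' hcol
              rw [hstep] at hcol
              obtain ⟨ext, hext⟩ := pvBCollect_mono digit_map rest _ na' hcol
              rw [pvInsertItems na sym _ hna] at hext
              have hvals : na'.values = na.values ++ pvDigitVal ch :: ext.map (fun q => q.2) := by
                unfold PySem.Dict.values
                rw [hext]
                simp [PySem.Dict.values]
              rw [Bool.or_eq_true]
              right
              rw [decide_eq_true_eq]
              intro hlen
              have hndall := pvOfListNodup_of_len na'.values hlen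
              rw [hvals, List.nodup_append] at hndall
              exact hndall.2.2 (pvDigitVal ch) hnu (pvDigitVal ch) (by simp) rfl
            · -- fresh digit: A records it; B collects it
              have hvals : (na.insert sym (pvDigitVal ch)).values = na.values ++ [pvDigitVal ch] :=
                pvInsertValues na sym _ hna
              have hL : pvALoop digit_map used ((ch, sym) :: rest) na na.values
                  = pvALoop digit_map used rest (na.insert sym (pvDigitVal ch))
                      (PySem.Set.add na.values (pvDigitVal ch)) := by
                simp only [pvALoop, hd, hdm, hna]
                have hcond : ¬ (used.contains (pvDigitVal ch) || PySem.Set.contains na.values (pvDigitVal ch)) = true := by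
                  rw [Bool.or_eq_true]
                  rintro (h | h)
                  · exact huse h
                  · exact hnu (by simpa [PySem.Set.contains_iff] using h)
                rw [if_neg hcond]
                simp
              have hadd : PySem.Set.add na.values (pvDigitVal ch) = (na.insert sym (pvDigitVal ch)).values := by
                unfold PySem.Set.add
                rw [hvals]
                rw [if_neg (by simpa [PySem.Set.contains_iff] using hnu)]
              have hnd' : (na.insert sym (pvDigitVal ch)).values.Nodup := by
                rw [hvals, List.nodup_append]
                refine ⟨hnd, List.nodup_singleton _, ?_⟩
                intro a ha b hb
                rw [List.mem_singleton] at hb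
                subst hb
                exact fun h => hnu (h ▸ ha)
              have hu' : ∀ v ∈ (na.insert sym (pvDigitVal ch)).values, used.contains v = false := by
                rw [hvals]
                intro v hvmem
                rcases List.mem_append.mp hvmem with hmem | hmem
                · exact hu v hmem
                · rw [List.mem_singleton] at hmem
                  subst hmem
                  exact Bool.not_eq_true _ ▸ (by simpa using huse)
              rw [hL, hadd, ih _ hnd' hu']
              exact (pvRHS_skip digit_map used (ch, sym) rest na _ hb1 hb2 hstep).symm
    · -- non-digit position
      have hb2 : pvBBad2 digit_map (ch, sym) = false := by simp [pvBBad2, hd]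
      by_cases hs : sym = String.mk [ch]
      · have hL : pvALoop digit_map used ((ch, sym) :: rest) na na.values
            = pvALoop digit_map used rest na na.values := by
          simp only [pvALoop]
          simp [hd, hs]
        rw [hL, ih na hnd hu]
        exact (pvRHS_skip digit_map used (ch, sym) rest na na
          (by simp [pvBBad1, hd, hs]) hb2 (by simp [pvBCollect, hd])).symm
      · have hL : pvALoop digit_map used ((ch, sym) :: rest) na na.values = ([], false) := by
          simp only [pvALoop]
          simp [hd, hs]
        rw [hL, pvRHS_bad1 digit_map used (ch, sym) rest na (by simp [pvBBad1, hd, hs])]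

-- ===== VERDICT (by name: the statement is the Claim_ definition above) =====
theorem derive_output_py_spec : Claim_equal_derive_output_py := by
  intro result_val out_syms f_type op_name op_sym digit_map used _ _
  unfold Spec_derive_output_py derive_output_py derive_output_py_alt
  cases hpost : pvPost f_type result_val with
  | none => rfl
  | some fmt0 =>
    cases hsym : pvMathSym op_name with
    | none => rfl
    | some m_sym =>
      by_cases hlen : (pvApplySym fmt0 m_sym op_sym).length ≠ out_syms.length
      · simp only [if_pos hlen]
      · simp only [if_neg hlen]
        have h := pvMain digit_map used ((pvApplySym fmt0 m_sym op_sym).zip out_syms)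
          PySem.Dict.empty (by simp [PySem.Dict.empty, PySem.Dict.values]) (by simp [PySem.Dict.empty, PySem.Dict.values])
        unfold pvRHS at h
        exact h
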